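-- pv_equiv track=rewrite | github.com/MozillaSecurity/peach | Peach/Transformers/Encode/ASCII7bit.py | realEncode
-- ===== SOURCE A (Python) =====
-- def realEncode(data):
--     result = []
--     count = 0
--     last = 0
--     for c in data:
--         this = ord(c) << (8 - count)
--         if count:
--             result.append('%02X' % ((last >> 8) | (this & 0xFF)))
--         count = (count + 1) % 8
--         last = this
--     result.append('%02x' % (last >> 8))
--     return ''.join(result)
-- ===== SOURCE B (Python) =====
-- def realEncode(data):
--     # Single shift-register bit buffer: emit a byte whenever 8 bits are buffered.
--     acc = 0
--     nbits = 0
--     out = []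
--     for c in data:
--         acc |= ord(c) << nbits
--         nbits += 7
--         if nbits >= 8:
--             out.append('%02X' % (acc & 0xFF))
--             acc >>= 8
--             nbits -= 8
--     out.append('%02x' % acc)
--     return ''.join(out)
-- ===== Notes on version B (the rewrite author's own statement) =====
-- stated objective: idiomatic
-- what changed: Replaces A's sliding last/this pair with the (8-count) back-shift by a standard LSB-first bit-buffer (accumulator + bit count) that emits a byte whenever 8 bits are available.
import Mathlib
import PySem

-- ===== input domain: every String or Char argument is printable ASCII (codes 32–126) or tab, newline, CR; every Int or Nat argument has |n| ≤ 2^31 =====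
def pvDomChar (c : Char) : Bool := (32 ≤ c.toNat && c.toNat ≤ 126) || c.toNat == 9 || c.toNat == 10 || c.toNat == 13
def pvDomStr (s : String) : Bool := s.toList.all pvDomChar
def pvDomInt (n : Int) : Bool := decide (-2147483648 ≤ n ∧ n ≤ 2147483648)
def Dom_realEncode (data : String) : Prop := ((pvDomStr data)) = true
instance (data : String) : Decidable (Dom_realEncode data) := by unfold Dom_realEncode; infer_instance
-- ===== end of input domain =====

-- B replaces A's sliding last/this pair and (8-count) back-shift by a standard
-- LSB-first bit-buffer (accumulator + bit count); same O(n) cost, more idiomatic.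


-- shared port of Python's '%02X' / '%02x' formatting (exact for arguments < 256,
-- which is all both programs produce on Dom_realEncode)
def pvHexDigit (upper : Bool) (n : Nat) : Char :=
  if n < 10 then Char.ofNat (48 + n) else Char.ofNat ((if upper then 55 else 87) + n)

def pvHex2 (upper : Bool) (n : Nat) : String :=
  String.ofList [pvHexDigit upper (n / 16), pvHexDigit upper (n % 16)]

-- ===== PORT A =====
-- state = (result, count, last), exactly A's loop body
def realEncodeStep (st : List String × Nat × Nat) (c : Char) : List String × Nat × Nat :=
  let result := st.1
  let count := st.2.1
  let last := st.2.2
  let this := c.toNat <<< (8 - count)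
  let result := if count ≠ 0 then result ++ [pvHex2 true ((last >>> 8) ||| (this &&& 0xFF))] else result
  (result, (count + 1) % 8, this)

def realEncode (data : String) : String :=
  let st := data.toList.foldl realEncodeStep ([], 0, 0)
  String.join (st.1 ++ [pvHex2 false (st.2.2 >>> 8)])

-- ===== PORT B =====
-- state = (out, acc, nbits), exactly B's loop body
def realEncodeAltStep (st : List String × Nat × Nat) (c : Char) : List String × Nat × Nat :=
  let out := st.1
  let acc := st.2.1 ||| (c.toNat <<< st.2.2)
  let nbits := st.2.2 + 7
  if 8 ≤ nbits then (out ++ [pvHex2 true (acc &&& 0xFF)], acc >>> 8, nbits - 8)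
  else (out, acc, nbits)

def realEncode_alt (data : String) : String :=
  let st := data.toList.foldl realEncodeAltStep ([], 0, 0)
  String.join (st.1 ++ [pvHex2 false st.2.1])

-- ===== PRECONDITION & SPEC =====
def Spec_realEncode (data : String) (out : String) : Prop := out = realEncode_alt data
instance (data : String) (out : String) : Decidable (Spec_realEncode data out) := by unfold Spec_realEncode; infer_instance

-- ===== CLAIM (what is proved, stated in full; the proofs are below) =====
def Claim_equal_realEncode : Prop := ∀ (data : String), Dom_realEncode data → Spec_realEncode data (realEncode data)

-- ===== LEMMAS AND PROOFS =====

/-- A disjoint bitwise-or is an addition. -/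
lemma pv_lor_small (a b e : Nat) (he : ∃ n : Nat, e = 2 ^ n) (ha : a < e) :
    a ||| b * e = b * e + a := by
  obtain ⟨n, rfl⟩ := he
  rw [Nat.lor_comm, ← Nat.shiftLeft_eq, ← Nat.shiftLeft_add_eq_or_of_lt ha, Nat.shiftLeft_eq]

/-- The three arithmetic facts of the emitting step: masking commutes with the
    disjoint or, the high bits do not depend on the low buffer, and the new
    buffer fits in `n - 1` bits. -/
lemma pv_emit_all (a x n : Nat) (hn1 : 1 ≤ n) (hn : n ≤ 7) (ha : a < 2 ^ n) (hx : x < 128) :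
    (a ||| (x <<< n &&& 255)) = ((a ||| x <<< n) &&& 255)
  ∧ (a ||| x <<< n) / 256 = x <<< n / 256
  ∧ (a ||| x <<< n) / 256 < 2 ^ (n - 1) := by
  have hK : 2 ^ (8 - n) * 2 ^ n = 256 := by
    rw [← pow_add, Nat.sub_add_cancel (by omega : n ≤ 8)]; norm_num
  have hKpos : 0 < 2 ^ (8 - n) := Nat.two_pow_pos _
  have h255 : (255 : Nat) = 2 ^ 8 - 1 := by norm_num
  rw [h255, Nat.shiftLeft_eq, Nat.and_two_pow_sub_one_eq_mod, Nat.and_two_pow_sub_one_eq_mod,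
    pv_lor_small a x _ ⟨n, rfl⟩ ha]
  have h256 : (2:Nat) ^ 8 = 256 := by norm_num
  rw [h256]
  have hmod : x * 2 ^ n % 256 = x % 2 ^ (8 - n) * 2 ^ n := by
    rw [← hK, Nat.mul_mod_mul_right]
  have hxa : (x * 2 ^ n + a) % 256 = x % 2 ^ (8 - n) * 2 ^ n + a := by
    rw [← hK, Nat.add_mod, Nat.mul_mod_mul_right, Nat.mod_eq_of_lt (a := a) (by
      calc a < 2 ^ n := ha
        _ ≤ 2 ^ (8 - n) * 2 ^ n := Nat.le_mul_of_pos_left _ hKpos),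
      Nat.mod_eq_of_lt]
    calc x % 2 ^ (8 - n) * 2 ^ n + a < (x % 2 ^ (8 - n) + 1) * 2 ^ n := by
          rw [Nat.add_mul, Nat.one_mul]; omega
      _ ≤ 2 ^ (8 - n) * 2 ^ n := by
          apply Nat.mul_le_mul_right
          have := Nat.mod_lt x hKpos
          omega
  have hdiv : (x * 2 ^ n + a) / 256 = x / 2 ^ (8 - n) := by
    rw [← hK, Nat.mul_comm (2 ^ (8 - n)), ← Nat.div_div_eq_div_mul,
      Nat.mul_comm x, Nat.mul_add_div (Nat.two_pow_pos _),
      Nat.div_eq_of_lt ha, Nat.add_zero]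
  have hdiv2 : x * 2 ^ n / 256 = x / 2 ^ (8 - n) := by
    rw [← hK, Nat.mul_comm (2 ^ (8 - n)), ← Nat.div_div_eq_div_mul,
      Nat.mul_div_cancel _ (Nat.two_pow_pos _)]
  refine ⟨?_, ?_, ?_⟩
  · rw [hmod, hxa, pv_lor_small a _ _ ⟨n, rfl⟩ ha]
  · rw [hdiv, hdiv2]
  · rw [hdiv, Nat.div_lt_iff_lt_mul hKpos]
    calc x < 128 := hx
      _ ≤ 2 ^ (n - 1) * 2 ^ (8 - n) := by
        rw [← pow_add]
        have h7 : n - 1 + (8 - n) = 7 := by omega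
        rw [h7]; norm_num

/-- Invariant relating A's fold state (result, count, last) and B's (out, acc, nbits). -/
def pvInv (a b : List String × Nat × Nat) : Prop :=
  b.1 = a.1 ∧ a.2.1 < 8 ∧ b.2.2 = (8 - a.2.1) % 8 ∧ b.2.1 = a.2.2 >>> 8 ∧ b.2.1 < 2 ^ b.2.2

lemma pvInv_step (a b : List String × Nat × Nat) (c : Char) (hc : c.toNat < 128)
    (h : pvInv a b) : pvInv (realEncodeStep a c) (realEncodeAltStep b c) := by
  obtain ⟨ra, ca, la⟩ := a
  obtain ⟨rb, ab, nb⟩ := b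
  obtain ⟨hr, hca, hnb, hab, hlt⟩ := h
  simp only at hr hca hnb hab hlt
  subst hnb hab
  interval_cases ca <;>
    simp only [realEncodeStep, realEncodeAltStep, pvInv, Nat.shiftRight_eq_div_pow] at hlt ⊢ <;>
    norm_num at hlt ⊢
  case «0» =>
    have h0 : la / 256 = 0 := by omega
    rw [h0, Nat.zero_or, Nat.shiftLeft_eq]
    exact ⟨hr, by omega, by omega⟩
  case «1» =>
    refine ⟨⟨hr, congrArg (pvHex2 true)
        (pv_emit_all (la / 256) c.toNat 7 (by norm_num) (by norm_num) (by omega) hc).1.symm⟩,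
      (pv_emit_all (la / 256) c.toNat 7 (by norm_num) (by norm_num) (by omega) hc).2.1,
      by have h3 := (pv_emit_all (la / 256) c.toNat 7 (by norm_num) (by norm_num) (by omega) hc).2.2
         omega⟩
  case «2» =>
    refine ⟨⟨hr, congrArg (pvHex2 true)
        (pv_emit_all (la / 256) c.toNat 6 (by norm_num) (by norm_num) (by omega) hc).1.symm⟩,
      (pv_emit_all (la / 256) c.toNat 6 (by norm_num) (by norm_num) (by omega) hc).2.1,
      by have h3 := (pv_emit_all (la / 256) c.toNat 6 (by norm_num) (by norm_num) (by omega) hc).2.2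
         omega⟩
  case «3» =>
    refine ⟨⟨hr, congrArg (pvHex2 true)
        (pv_emit_all (la / 256) c.toNat 5 (by norm_num) (by norm_num) (by omega) hc).1.symm⟩,
      (pv_emit_all (la / 256) c.toNat 5 (by norm_num) (by norm_num) (by omega) hc).2.1,
      by have h3 := (pv_emit_all (la / 256) c.toNat 5 (by norm_num) (by norm_num) (by omega) hc).2.2
         omega⟩
  case «4» =>
    refine ⟨⟨hr, congrArg (pvHex2 true)
        (pv_emit_all (la / 256) c.toNat 4 (by norm_num) (by norm_num) (by omega) hc).1.symm⟩,
      (pv_emit_all (la / 256) c.toNat 4 (by norm_num) (by norm_num) (by omega) hc).2.1,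
      by have h3 := (pv_emit_all (la / 256) c.toNat 4 (by norm_num) (by norm_num) (by omega) hc).2.2
         omega⟩
  case «5» =>
    refine ⟨⟨hr, congrArg (pvHex2 true)
        (pv_emit_all (la / 256) c.toNat 3 (by norm_num) (by norm_num) (by omega) hc).1.symm⟩,
      (pv_emit_all (la / 256) c.toNat 3 (by norm_num) (by norm_num) (by omega) hc).2.1,
      by have h3 := (pv_emit_all (la / 256) c.toNat 3 (by norm_num) (by norm_num) (by omega) hc).2.2
         omega⟩
  case «6» =>
    refine ⟨⟨hr, congrArg (pvHex2 true)
        (pv_emit_all (la / 256) c.toNat 2 (by norm_num) (by norm_num) (by omega) hc).1.symm⟩,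
      (pv_emit_all (la / 256) c.toNat 2 (by norm_num) (by norm_num) (by omega) hc).2.1,
      by have h3 := (pv_emit_all (la / 256) c.toNat 2 (by norm_num) (by norm_num) (by omega) hc).2.2
         omega⟩
  case «7» =>
    refine ⟨⟨hr, congrArg (pvHex2 true)
        (pv_emit_all (la / 256) c.toNat 1 (by norm_num) (by norm_num) (by omega) hc).1.symm⟩,
      (pv_emit_all (la / 256) c.toNat 1 (by norm_num) (by norm_num) (by omega) hc).2.1,
      by have h3 := (pv_emit_all (la / 256) c.toNat 1 (by norm_num) (by norm_num) (by omega) hc).2.2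
         omega⟩

lemma pvInv_foldl (l : List Char) (hl : ∀ c ∈ l, c.toNat < 128)
    (a b : List String × Nat × Nat) (h : pvInv a b) :
    pvInv (l.foldl realEncodeStep a) (l.foldl realEncodeAltStep b) := by
  induction l generalizing a b with
  | nil => exact h
  | cons c l ih =>
    exact ih (fun d hd => hl d (List.mem_cons_of_mem _ hd)) _ _
      (pvInv_step a b c (hl c (List.mem_cons_self ..)) h)

-- ===== VERDICT (by name: the statement is the Claim_ definition above) =====
theorem realEncode_spec : Claim_equal_realEncode := by
  intro data hdom
  unfold Spec_realEncode realEncode realEncode_alt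
  have hl : ∀ c ∈ data.toList, c.toNat < 128 := by
    intro c hcm
    have := List.all_eq_true.mp hdom c hcm
    simp [pvDomChar] at this
    omega
  have h := pvInv_foldl data.toList hl ([], 0, 0) ([], 0, 0) (by simp [pvInv])
  obtain ⟨hr, -, -, hab, -⟩ := h
  simp only [hr, hab]
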